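-- pv_equiv track=rewrite | github.com/usersem5/insot | playfair.py | getPairsEncrypt
-- ===== SOURCE A (Python) =====
-- def getPairsEncrypt(text):
--   pairs = []
--   text = list(text)
--   length = len(text)
--   i = 0
--   while i < length:
--     if i == length - 1: # last letter
--       pairs.append(f'{text[i]}X')
--       break
--     if text[i] == text[i+1]: # same letters
--       pairs.append(f'{text[i]}X')
--       text.insert(i+1, 'X')
--       length += 1
--     else: pairs.append(f'{text[i]}{text[i+1]}')
--     i += 2
--   return pairs
-- ===== SOURCE B (Python) =====
-- def getPairsEncrypt(text):
--   # Phase 1: one scan building a flat char list (duplicate/last char gets an 'X' mate),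
--   # Phase 2: group the flat string into 2-char digraphs.
--   flat = []
--   i = 0
--   n = len(text)
--   while i < n:
--     if i + 1 < n and text[i] != text[i+1]:
--       flat.append(text[i])
--       flat.append(text[i+1])
--       i += 2
--     else:
--       flat.append(text[i])
--       flat.append('X')
--       i += 1
--   s = ''.join(flat)
--   return [s[j:j+2] for j in range(0, len(s), 2)]
-- ===== Notes on version B (the rewrite author's own statement) =====
-- stated objective: faster
-- what changed: B never mutates the text: it scans the immutable input once building a flat character list (emitting a padding mate for a duplicate or trailing char), then groups that flat string into digraphs in a second pass, whereas A's single loop repeatedly inserts padding into the growing list, which costs a shift of the whole tail each time.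
import Mathlib
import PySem

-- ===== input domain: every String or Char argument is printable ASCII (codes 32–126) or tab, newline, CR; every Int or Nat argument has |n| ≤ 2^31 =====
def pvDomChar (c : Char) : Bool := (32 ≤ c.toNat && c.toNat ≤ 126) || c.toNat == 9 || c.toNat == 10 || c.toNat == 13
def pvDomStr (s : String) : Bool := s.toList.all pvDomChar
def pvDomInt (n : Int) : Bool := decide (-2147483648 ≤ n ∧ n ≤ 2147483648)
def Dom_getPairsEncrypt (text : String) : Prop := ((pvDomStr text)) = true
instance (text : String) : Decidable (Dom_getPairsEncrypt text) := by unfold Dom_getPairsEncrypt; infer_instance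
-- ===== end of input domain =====

-- B differs from A: B scans the immutable input once into a flat char list, then groups it
-- into digraphs in a second pass; A mutates the list with insert while pairing (alternative decomposition).

-- ===== PORT A =====
-- A's while loop over the mutable list `text` with running `length` and index `i`;
-- pairs are emitted front-to-back (cons = append order). `text.insert(i+1,'X')` is take/++/drop.
def pvLoopA (text : List Char) (len i : Nat) : List String :=
  if _h : i < len then
    if i = len - 1 then
      [String.mk [text.getD i ' ', 'X']]
    else
      if text.getD i ' ' = text.getD (i+1) ' ' then
        String.mk [text.getD i ' ', 'X'] ::
          pvLoopA (text.take (i+1) ++ 'X' :: text.drop (i+1)) (len + 1) (i + 2)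
      else
        String.mk [text.getD i ' ', text.getD (i+1) ' '] :: pvLoopA text len (i + 2)
  else []
termination_by len - i
decreasing_by all_goals omega

def getPairsEncrypt (text : String) : List String :=
  pvLoopA text.toList text.toList.length 0

-- ===== PORT B =====
-- Phase 1 of Source B: index scan over the immutable text building the flat char list.
def pvFlatB (text : List Char) (n i : Nat) : List Char :=
  if _h : i < n then
    if i + 1 < n ∧ text.getD i ' ' ≠ text.getD (i+1) ' ' then
      text.getD i ' ' :: text.getD (i+1) ' ' :: pvFlatB text n (i + 2)
    else
      text.getD i ' ' :: 'X' :: pvFlatB text n (i + 1)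
  else []
termination_by n - i
decreasing_by all_goals omega

-- Phase 2 of Source B: [s[j:j+2] for j in range(0, len(s), 2)].
def pvGroup2 (s : List Char) : List String :=
  match s with
  | [] => []
  | [a] => [String.mk [a]]
  | a :: b :: rest => String.mk [a, b] :: pvGroup2 rest

def getPairsEncrypt_alt (text : String) : List String :=
  pvGroup2 (pvFlatB text.toList text.toList.length 0)

-- ===== PRECONDITION & SPEC =====
def Spec_getPairsEncrypt (text : String) (out : List String) : Prop := out = getPairsEncrypt_alt text
instance (text : String) (out : List String) : Decidable (Spec_getPairsEncrypt text out) := by unfold Spec_getPairsEncrypt; infer_instance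

-- ===== CLAIM (what is proved, stated in full; the proofs are below) =====
def Claim_equal_getPairsEncrypt : Prop := ∀ (text : String), Dom_getPairsEncrypt text → Spec_getPairsEncrypt text (getPairsEncrypt text)

-- ===== LEMMAS AND PROOFS =====

-- Common reference function both ports are reduced to.
def pvSpecPairs : List Char → List String
  | [] => []
  | [a] => [String.mk [a, 'X']]
  | a :: b :: rest =>
      if a = b then String.mk [a, 'X'] :: pvSpecPairs (b :: rest)
      else String.mk [a, b] :: pvSpecPairs rest

lemma pvLoopA_eq_spec (text : List Char) (len i : Nat)
    (hlen : len = text.length) (hi : i ≤ len) :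
    pvLoopA text len i = pvSpecPairs (text.drop i) := by
  rcases Nat.lt_or_ge i len with h | h
  · have hi' : i < text.length := hlen ▸ h
    have hdrop : text.drop i = text[i] :: text.drop (i+1) :=
      List.drop_eq_getElem_cons hi'
    rw [pvLoopA]
    simp only [dif_pos h]
    by_cases hlast : i = len - 1
    · -- last letter
      have h1 : i + 1 = text.length := by omega
      have hdrop1 : text.drop (i+1) = [] := by
        rw [List.drop_eq_nil_iff]; omega
      rw [if_pos hlast, List.getD_eq_getElem text ' ' hi', hdrop, hdrop1]
      simp [pvSpecPairs]
    · have hi1 : i + 1 < text.length := by omega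
      have hdrop1 : text.drop (i+1) = text[i+1] :: text.drop (i+2) :=
        List.drop_eq_getElem_cons hi1
      rw [if_neg hlast]
      rw [List.getD_eq_getElem text ' ' hi', List.getD_eq_getElem text ' ' hi1]
      by_cases heq : text[i] = text[i+1]
      · rw [if_pos heq]
        have htake : (text.take (i+1) ++ ['X']).length = i + 2 := by
          simp; omega
        have hsplit : text.take (i+1) ++ 'X' :: text.drop (i+1)
            = (text.take (i+1) ++ ['X']) ++ text.drop (i+1) := by simp
        have hnew : (text.take (i+1) ++ 'X' :: text.drop (i+1)).length = len + 1 := by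
          rw [hsplit, List.length_append, htake]; simp; omega
        have hdropnew : (text.take (i+1) ++ 'X' :: text.drop (i+1)).drop (i+2)
            = text.drop (i+1) := by
          rw [hsplit, ← htake, List.drop_left]
        rw [pvLoopA_eq_spec _ _ _ hnew.symm (by omega), hdropnew, hdrop, hdrop1]
        conv_rhs => rw [pvSpecPairs]
        rw [if_pos heq, ← hdrop1, heq]
      · rw [if_neg heq]
        rw [pvLoopA_eq_spec text len (i+2) hlen (by omega), hdrop, hdrop1]
        simp [pvSpecPairs, if_neg heq]
  · rw [pvLoopA]
    simp only [dif_neg (by omega : ¬ i < len)]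
    have : text.drop i = [] := by rw [List.drop_eq_nil_iff]; omega
    rw [this]; rfl
termination_by len - i
decreasing_by all_goals omega

lemma pvFlatB_eq_spec (text : List Char) (n i : Nat)
    (hn : n = text.length) (hi : i ≤ n) :
    pvGroup2 (pvFlatB text n i) = pvSpecPairs (text.drop i) := by
  rcases Nat.lt_or_ge i n with h | h
  · have hi' : i < text.length := hn ▸ h
    have hdrop : text.drop i = text[i] :: text.drop (i+1) :=
      List.drop_eq_getElem_cons hi'
    rw [pvFlatB]
    simp only [dif_pos h]
    by_cases hc : i + 1 < n ∧ text.getD i ' ' ≠ text.getD (i+1) ' '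
    · obtain ⟨h1, hne⟩ := hc
      have hi1 : i + 1 < text.length := hn ▸ h1
      have hdrop1 : text.drop (i+1) = text[i+1] :: text.drop (i+2) :=
        List.drop_eq_getElem_cons hi1
      rw [if_pos ⟨h1, hne⟩]
      rw [List.getD_eq_getElem text ' ' hi', List.getD_eq_getElem text ' ' hi1] at hne ⊢
      rw [pvGroup2, pvFlatB_eq_spec text n (i+2) hn (by omega), hdrop, hdrop1]
      simp [pvSpecPairs, if_neg hne]
    · rw [if_neg hc]
      rw [List.getD_eq_getElem text ' ' hi'] at hc ⊢
      rw [pvGroup2, pvFlatB_eq_spec text n (i+1) hn (by omega), hdrop]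
      by_cases hlast : i + 1 < n
      · -- duplicate case: text[i] = text[i+1]
        have hi1 : i + 1 < text.length := hn ▸ hlast
        have heq : text[i] = text[i+1] := by
          by_contra hne
          exact hc ⟨hlast, by rw [List.getD_eq_getElem text ' ' hi1]; exact hne⟩
        have hdrop1 : text.drop (i+1) = text[i+1] :: text.drop (i+2) :=
          List.drop_eq_getElem_cons hi1
        rw [hdrop1]
        simp [pvSpecPairs, heq]
      · -- last letter
        have hdrop1 : text.drop (i+1) = [] := by rw [List.drop_eq_nil_iff]; omega
        rw [hdrop1]
        simp [pvSpecPairs]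
  · rw [pvFlatB]
    simp only [dif_neg (by omega : ¬ i < n)]
    have : text.drop i = [] := by rw [List.drop_eq_nil_iff]; omega
    rw [this]; rfl
termination_by n - i
decreasing_by all_goals omega

-- ===== VERDICT (by name: the statement is the Claim_ definition above) =====
theorem getPairsEncrypt_spec : Claim_equal_getPairsEncrypt := by
  intro text _
  unfold Spec_getPairsEncrypt getPairsEncrypt getPairsEncrypt_alt
  rw [pvLoopA_eq_spec _ _ _ rfl (by omega), pvFlatB_eq_spec _ _ _ rfl (by omega)]
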